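-- pv_equiv track=rewrite | github.com/pwijngaard/cytoscouts | cytoscouts.py | getHisto
-- ===== SOURCE A (Python) =====
-- def getHisto(deg):
--     import itertools
--     hist = sorted(deg.items(), key=lambda x: x[1])  # become sorted /tuples/
--     x = []
--     y = []
--     for value, items in itertools.groupby(hist, lambda x: x[1]):  # by 'value'
--         for i in items:  # items itself is just a memory object
--             x.append(i[1])  # populate list of refDict values
--     for i in x:  # a better way to do this? idk
--         y.append(x.count(i))  # populate the fequency of said dict vals
--     hist = list(hist)
--     return hist, x, y
-- ===== SOURCE B (Python) =====
-- def getHisto(deg):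
--     hist = sorted(deg.items(), key=lambda kv: kv[1])
--     x = [v for _, v in hist]
--     y = []
--     i = 0
--     n = len(x)
--     while i < n:
--         j = i + 1
--         while j < n and x[j] == x[i]:
--             j += 1
--         y += [j - i] * (j - i)
--         i = j
--     return hist, x, y
-- ===== Notes on version B (the rewrite author's own statement) =====
-- stated objective: faster
-- what changed: y is computed in one linear grouping pass over the already-sorted value list (each maximal run of length n contributes n copies of n) instead of an x.count(i) rescan of the whole list for every element; x is taken directly from hist instead of via groupby flattening.
import Mathlib
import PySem

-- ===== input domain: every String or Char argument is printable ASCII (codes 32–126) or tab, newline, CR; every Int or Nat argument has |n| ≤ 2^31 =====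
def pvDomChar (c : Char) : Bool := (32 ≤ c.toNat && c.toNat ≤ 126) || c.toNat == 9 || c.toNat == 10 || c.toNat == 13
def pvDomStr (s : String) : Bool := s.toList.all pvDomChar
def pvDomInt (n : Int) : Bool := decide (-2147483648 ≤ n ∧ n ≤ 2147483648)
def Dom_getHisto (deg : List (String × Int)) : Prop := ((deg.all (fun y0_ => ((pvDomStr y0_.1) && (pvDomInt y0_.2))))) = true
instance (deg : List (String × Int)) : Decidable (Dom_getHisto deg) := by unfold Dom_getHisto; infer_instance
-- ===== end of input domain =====

-- B computes y in one grouping pass over the sorted values instead of a count-rescan per element.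

-- ===== PORT A =====
-- itertools.groupby(hist, λx. x[1]): the current group (run of equal keys) and the remainder
def takeGrp (v : Int) : List (String × Int) → List (String × Int)
  | [] => []
  | p :: t => if p.2 = v then p :: takeGrp v t else []

def dropGrp (v : Int) : List (String × Int) → List (String × Int)
  | [] => []
  | p :: t => if p.2 = v then dropGrp v t else p :: t

theorem length_dropGrp_le (v : Int) (t : List (String × Int)) :
    (dropGrp v t).length ≤ t.length := by
  induction t with
  | nil => simp [dropGrp]
  | cons p t ih => simp only [dropGrp]; split_ifs <;> simp; omega

-- the double loop 'for value, items in groupby(hist, …): for i in items: x.append(i[1])'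
def buildX : List (String × Int) → List Int
  | [] => []
  | p :: t => (p.2 :: (takeGrp p.2 t).map (·.2)) ++ buildX (dropGrp p.2 t)
termination_by l => l.length
decreasing_by exact Nat.lt_succ_of_le (length_dropGrp_le _ _)

def getHisto (deg : List (String × Int)) : (List (String × Int)) × List Int × List Int :=
  let hist := PySem.List.sorted deg (fun kv => kv.2)
  let x := buildX hist
  let y := x.map (fun i => (PySem.List.count x i : Int))
  (hist, x, y)

-- ===== PORT B =====
-- the inner 'while j < n and x[j] == x[i]' walk: length of the run of v at the head, and the rest
def takeCount (v : Int) : List Int → Nat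
  | [] => 0
  | w :: t => if w = v then takeCount v t + 1 else 0

def dropRun (v : Int) : List Int → List Int
  | [] => []
  | w :: t => if w = v then dropRun v t else w :: t

theorem length_dropRun_le (v : Int) (t : List Int) :
    (dropRun v t).length ≤ t.length := by
  induction t with
  | nil => simp [dropRun]
  | cons w t ih => simp only [dropRun]; split_ifs <;> simp; omega

-- the outer 'while i < n' loop: run of length n contributes n copies of n
def runY : List Int → List Int
  | [] => []
  | v :: t => List.replicate (takeCount v t + 1) ((takeCount v t + 1 : Nat) : Int) ++ runY (dropRun v t)
termination_by l => l.length
decreasing_by exact Nat.lt_succ_of_le (length_dropRun_le _ _)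

def getHisto_alt (deg : List (String × Int)) : (List (String × Int)) × List Int × List Int :=
  let hist := PySem.List.sorted deg (fun kv => kv.2)
  let x := hist.map (·.2)
  (hist, x, runY x)

-- ===== PRECONDITION & SPEC =====
def Spec_getHisto (deg : List (String × Int)) (out : (List (String × Int)) × List Int × List Int) : Prop := out = getHisto_alt deg
instance (deg : List (String × Int)) (out : (List (String × Int)) × List Int × List Int) : Decidable (Spec_getHisto deg out) := by unfold Spec_getHisto; infer_instance

-- ===== CLAIM (what is proved, stated in full; the proofs are below) =====
def Claim_equal_getHisto : Prop := ∀ (deg : List (String × Int)), Dom_getHisto deg → Spec_getHisto deg (getHisto deg)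

-- ===== LEMMAS AND PROOFS =====

theorem takeGrp_append_dropGrp (v : Int) (t : List (String × Int)) :
    takeGrp v t ++ dropGrp v t = t := by
  induction t with
  | nil => simp [takeGrp, dropGrp]
  | cons p t ih =>
    simp only [takeGrp, dropGrp]
    split_ifs <;> simp [ih]

-- groupby flattening just reproduces the values in order
theorem buildX_eq (l : List (String × Int)) : buildX l = l.map (·.2) := by
  induction l using buildX.induct with
  | case1 => simp [buildX]
  | case2 p t ih =>
    rw [buildX, ih]
    have h := takeGrp_append_dropGrp p.2 t
    calc (p.2 :: (takeGrp p.2 t).map (·.2)) ++ (dropGrp p.2 t).map (·.2)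
        = p.2 :: (takeGrp p.2 t ++ dropGrp p.2 t).map (·.2) := by simp
      _ = (p :: t).map (·.2) := by rw [h]; rfl

theorem replicate_takeCount_append_dropRun (v : Int) (t : List Int) :
    List.replicate (takeCount v t) v ++ dropRun v t = t := by
  induction t with
  | nil => simp [takeCount, dropRun]
  | cons w t ih =>
    simp only [takeCount, dropRun]
    split_ifs with h
    · subst h; simp [List.replicate_succ, ih]
    · simp

theorem lt_of_mem_dropRun (v : Int) (t : List Int)
    (hp : t.Pairwise (· ≤ ·)) (hb : ∀ a ∈ t, v ≤ a) :
    ∀ e ∈ dropRun v t, v < e := by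
  induction t with
  | nil => simp [dropRun]
  | cons w t ih =>
    simp only [dropRun]
    rcases List.pairwise_cons.mp hp with ⟨hw, hp'⟩
    split_ifs with h
    · subst h
      exact ih hp' (fun a ha => hb a (List.mem_cons_of_mem _ ha))
    · intro e he
      have hvw : v < w := lt_of_le_of_ne (hb w (List.mem_cons_self)) (Ne.symm h)
      rcases List.mem_cons.mp he with rfl | he'
      · exact hvw
      · exact lt_of_lt_of_le hvw (hw e he')

theorem dropRun_sublist (v : Int) (t : List Int) : (dropRun v t).Sublist t := by
  induction t with
  | nil => simp [dropRun]
  | cons w t ih =>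
    simp only [dropRun]
    split_ifs with h
    · exact ih.trans (List.sublist_cons_self _ _)
    · exact List.Sublist.refl _

-- the heart: on a sorted list, the per-element global count equals the run length
theorem map_count_eq_runY (x : List Int) (hp : x.Pairwise (· ≤ ·)) :
    x.map (fun i => (List.count i x : Int)) = runY x := by
  induction x using runY.induct with
  | case1 => simp [runY]
  | case2 v t ih =>
    rcases List.pairwise_cons.mp hp with ⟨hb, hpt⟩
    have hr : ∀ e ∈ dropRun v t, v < e := lt_of_mem_dropRun v t hpt hb
    have hpr : (dropRun v t).Pairwise (· ≤ ·) := hpt.sublist (dropRun_sublist v t)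
    have hsplit := replicate_takeCount_append_dropRun v t
    set k := takeCount v t with hk
    set r := dropRun v t with hrdef
    have hvr : v ∉ r := fun hm => lt_irrefl v (hr v hm)
    -- count of v in the whole list is k + 1
    have hcv : List.count v (v :: t) = k + 1 := by
      rw [← hsplit]
      simp [List.count_append, List.count_eq_zero.mpr hvr]
    -- counts of the tail elements are unchanged by stripping the leading run
    have hcw : ∀ w ∈ r, List.count w (v :: t) = List.count w r := by
      intro w hw
      have hne : v ≠ w := ne_of_lt (hr w hw)
      rw [← hsplit]
      simp [List.count_append, List.count_replicate, hne]
    calc (v :: t).map (fun i => (List.count i (v :: t) : Int))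
        = (v :: (List.replicate k v ++ r)).map (fun i => (List.count i (v :: t) : Int)) := by
          rw [hsplit]
      _ = List.replicate (k + 1) ((k + 1 : Nat) : Int)
            ++ r.map (fun i => (List.count i (v :: t) : Int)) := by
          simp only [List.map_cons, List.map_append, List.map_replicate, hcv]
          rw [List.replicate_succ]
          simp
      _ = List.replicate (k + 1) ((k + 1 : Nat) : Int)
            ++ r.map (fun i => (List.count i r : Int)) := by
          congr 1
          exact List.map_congr_left (fun w hw => by rw [hcw w hw])
      _ = List.replicate (k + 1) ((k + 1 : Nat) : Int) ++ runY r := by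
          rw [ih hpr]
      _ = runY (v :: t) := by rw [runY]

-- ===== VERDICT (by name: the statement is the Claim_ definition above) =====
theorem getHisto_spec : Claim_equal_getHisto := by
  intro deg _
  unfold Spec_getHisto getHisto getHisto_alt
  have hx := buildX_eq (PySem.List.sorted deg (fun kv => kv.2))
  have hp : ((PySem.List.sorted deg (fun kv => kv.2)).map (·.2)).Pairwise (· ≤ ·) :=
    PySem.List.sorted_map_key_pairwise deg (fun kv => kv.2)
  have hy := map_count_eq_runY _ hp
  simp only [hx, PySem.List.count_eq]
  refine congrArg _ (congrArg _ ?_)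
  simpa [List.count_eq_countP] using hy
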